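-- pv_equiv track=rewrite | github.com/NikolajBoRasmussen/GolfBot---CDIO | Navigation/test/otherTest.py | check_last_segment
-- ===== SOURCE A (Python) =====
-- def check_last_segment(path):
--     """
--     Returnerer antallet af celler i det sidste segment af den komprimerede path.
--     """
--     # compact path til segmenter (dx, dy, count)
--     diffs = [(path[i+1][0] - path[i][0], path[i+1][1] - path[i][1])
--              for i in range(len(path) - 1)]
--     segments = []
--     i = 0
--     while i < len(diffs):
--         dx, dy = diffs[i]
--         cnt = 1
--         i += 1
--         while i < len(diffs) and diffs[i] == (dx, dy):
--             cnt += 1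
--             i += 1
--         segments.append((dx, dy, cnt))
--     if not segments:
--         return 0
--     # Antal celler i det sidste segment
--     return segments[-1][2]
-- ===== SOURCE B (Python) =====
-- def check_last_segment(path):
--     n = len(path)
--     if n < 2:
--         return 0
--     d = (path[-1][0] - path[-2][0], path[-1][1] - path[-2][1])
--     count = 1
--     for i in range(n - 2, 0, -1):
--         if (path[i][0] - path[i - 1][0], path[i][1] - path[i - 1][1]) == d:
--             count += 1
--         else:
--             break
--     return count
-- ===== Notes on version B (the rewrite author's own statement) =====
-- stated objective: simpler
-- what changed: Instead of building the full diffs list and grouping it into run-length segments, B looks at the last diff and scans backward over the path, counting only the final run and stopping at the first mismatch.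
import Mathlib
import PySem

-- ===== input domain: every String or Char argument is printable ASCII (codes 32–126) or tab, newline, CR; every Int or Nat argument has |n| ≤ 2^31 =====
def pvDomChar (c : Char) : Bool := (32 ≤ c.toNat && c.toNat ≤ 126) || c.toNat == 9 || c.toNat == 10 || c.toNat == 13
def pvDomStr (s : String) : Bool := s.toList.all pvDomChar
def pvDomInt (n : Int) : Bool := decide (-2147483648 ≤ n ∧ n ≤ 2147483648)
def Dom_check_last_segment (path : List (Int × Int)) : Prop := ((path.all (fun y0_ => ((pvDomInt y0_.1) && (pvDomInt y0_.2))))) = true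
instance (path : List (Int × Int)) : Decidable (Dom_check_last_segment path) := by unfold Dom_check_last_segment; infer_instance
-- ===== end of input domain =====

-- B replaces A's full diffs-then-segments construction by a single backward scan of the final run; objective: simpler.

-- ===== PORT A =====
-- the diffs list comprehension: diffs[i] = path[i+1] - path[i] for i in range(len(path)-1)
def pvDiffsA (path : List (Int × Int)) : List (Int × Int) :=
  (List.range (path.length - 1)).map fun i =>
    ((path.getD (i + 1) (0, 0)).1 - (path.getD i (0, 0)).1,
     (path.getD (i + 1) (0, 0)).2 - (path.getD i (0, 0)).2)

-- the inner while loop: how many leading elements of the remaining diffs equal (dx, dy)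
def pvRunLen (d : Int × Int) : List (Int × Int) → Nat
  | [] => 0
  | x :: xs => if x = d then pvRunLen d xs + 1 else 0

-- the outer while loop: consume one run per iteration, appending (dx, dy, cnt)
def pvSegsA : List (Int × Int) → List (Int × Int × Int)
  | [] => []
  | d :: rest =>
      (d.1, d.2, (1 : Int) + (pvRunLen d rest : Int)) :: pvSegsA (rest.drop (pvRunLen d rest))
termination_by l => l.length
decreasing_by
  simp only [List.length_drop, List.length_cons]; omega

def check_last_segment (path : List (Int × Int)) : Int :=
  match (pvSegsA (pvDiffsA path)).getLast? with
  | none => 0          -- "if not segments: return 0"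
  | some s => s.2.2    -- "return segments[-1][2]"

-- ===== PORT B =====
-- Source B's backward index loop (i from n-2 down to 1, breaking on the first mismatch)
-- is ported as recursion down the reversed path: b is path[i], c is path[i-1]
def pvBwd (d : Int × Int) : (Int × Int) → List (Int × Int) → Int
  | _, [] => 0
  | b, c :: more => if (b.1 - c.1, b.2 - c.2) = d then 1 + pvBwd d c more else 0

def check_last_segment_alt (path : List (Int × Int)) : Int :=
  match path.reverse with
  | a :: b :: rest => 1 + pvBwd (a.1 - b.1, a.2 - b.2) b rest
  | _ => 0             -- fewer than two points: return 0

-- ===== PRECONDITION & SPEC =====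
def Spec_check_last_segment (path : List (Int × Int)) (out : Int) : Prop := out = check_last_segment_alt path
instance (path : List (Int × Int)) (out : Int) : Decidable (Spec_check_last_segment path out) := by unfold Spec_check_last_segment; infer_instance

-- ===== CLAIM (what is proved, stated in full; the proofs are below) =====
def Claim_equal_check_last_segment : Prop := ∀ (path : List (Int × Int)), Dom_check_last_segment path → Spec_check_last_segment path (check_last_segment path)

-- ===== LEMMAS AND PROOFS =====

-- structural form of the diffs list
def pvFwdDiffs : List (Int × Int) → List (Int × Int)
  | x :: y :: r => (y.1 - x.1, y.2 - x.2) :: pvFwdDiffs (y :: r)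
  | _ => []

-- length of the trailing run of equal elements, front recursion
def pvTrailC : List (Int × Int) → Int
  | [] => 0
  | x :: xs => if xs.all (fun y => y = x) then (xs.length : Int) + 1 else pvTrailC xs

-- pairwise differences of a reversed list (previous minus next)
def pvRevD : List (Int × Int) → List (Int × Int)
  | x :: y :: r => (x.1 - y.1, x.2 - y.2) :: pvRevD (y :: r)
  | _ => []

theorem pvDiffsA_cons (x y : Int × Int) (r : List (Int × Int)) :
    pvDiffsA (x :: y :: r) = (y.1 - x.1, y.2 - x.2) :: pvDiffsA (y :: r) := by
  simp only [pvDiffsA, List.length_cons, Nat.add_sub_cancel]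
  rw [List.range_succ_eq_map]
  simp [List.map_map, Function.comp_def, Nat.succ_eq_add_one]

theorem pvDiffsA_eq_fwd (path : List (Int × Int)) : pvDiffsA path = pvFwdDiffs path := by
  induction path with
  | nil => simp [pvDiffsA, pvFwdDiffs]
  | cons x xs ih =>
      cases xs with
      | nil => simp [pvDiffsA, pvFwdDiffs]
      | cons y r => rw [pvDiffsA_cons, ih, pvFwdDiffs]

theorem pvRunLen_le (d : Int × Int) (l : List (Int × Int)) : pvRunLen d l ≤ l.length := by
  induction l with
  | nil => simp [pvRunLen]
  | cons x xs ih =>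
      simp only [pvRunLen, List.length_cons]
      split
      · omega
      · omega

theorem pvRunLen_all (d : Int × Int) (l : List (Int × Int)) (h : pvRunLen d l = l.length) :
    l.all (fun y => y = d) = true := by
  induction l with
  | nil => simp
  | cons x xs ih =>
      simp only [pvRunLen, List.length_cons] at h
      by_cases hx : x = d
      · rw [if_pos hx] at h
        have := ih (by omega)
        simp [List.all_cons, hx, this]
      · rw [if_neg hx] at h
        have := pvRunLen_le d xs
        omega

theorem pvRunLen_of_all (d : Int × Int) (l : List (Int × Int)) (h : l.all (fun y => y = d) = true) :
    pvRunLen d l = l.length := by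
  induction l with
  | nil => simp [pvRunLen]
  | cons x xs ih =>
      simp at h
      simp [pvRunLen, h.1, ih (by simp; exact h.2)]

theorem pvTrailC_drop (d : Int × Int) (rest : List (Int × Int))
    (h : rest.drop (pvRunLen d rest) ≠ []) :
    pvTrailC (d :: rest) = pvTrailC (rest.drop (pvRunLen d rest)) := by
  induction rest with
  | nil => simp [pvRunLen] at h
  | cons x xs ih =>
      by_cases hx : x = d
      · subst hx
        have hk : pvRunLen x (x :: xs) = pvRunLen x xs + 1 := by simp [pvRunLen]
        rw [hk] at h ⊢
        rw [List.drop_succ_cons] at h ⊢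
        have h2 := ih h
        have hallf : (xs.all (fun y => y = x)) = false := by
          cases hb : xs.all (fun y => y = x)
          · rfl
          · exfalso
            apply h
            rw [List.drop_eq_nil_iff, pvRunLen_of_all x xs hb]
        have e1 : pvTrailC (x :: x :: xs) = pvTrailC (x :: xs) := by
          have hc : ((x :: xs).all (fun y => y = x)) = false := by
            simp [List.all_cons, hallf]
          rw [show pvTrailC (x :: x :: xs) =
                if ((x :: xs).all (fun y => y = x)) then (((x :: xs).length : Int) + 1)
                else pvTrailC (x :: xs) from rfl, hc]
          simp
        rw [e1, h2]
      · have hk : pvRunLen d (x :: xs) = 0 := by simp [pvRunLen, hx]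
        rw [hk] at h ⊢
        simp only [List.drop_zero] at h ⊢
        have hc : ((x :: xs).all (fun y => y = d)) = false := by
          simp [List.all_cons, hx]
        rw [show pvTrailC (d :: x :: xs) =
              if ((x :: xs).all (fun y => y = d)) then (((x :: xs).length : Int) + 1)
              else pvTrailC (x :: xs) from rfl, hc]
        simp

theorem pvSegsA_ne_nil (l : List (Int × Int)) (h : l ≠ []) : pvSegsA l ≠ [] := by
  cases l with
  | nil => simp at h
  | cons d rest => rw [pvSegsA]; simp

theorem pvLast_segs (l : List (Int × Int)) :
    (match (pvSegsA l).getLast? with | none => (0 : Int) | some s => s.2.2) = pvTrailC l := by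
  induction l using pvSegsA.induct with
  | case1 => simp [pvSegsA, pvTrailC]
  | case2 d rest ih =>
      rw [pvSegsA]
      by_cases hd : rest.drop (pvRunLen d rest) = []
      · rw [hd]
        have hlen : pvRunLen d rest = rest.length := by
          have := pvRunLen_le d rest
          simp [List.drop_eq_nil_iff] at hd
          omega
        have hall := pvRunLen_all d rest hlen
        have eT : pvTrailC (d :: rest) = (rest.length : Int) + 1 := by
          rw [show pvTrailC (d :: rest) =
                if (rest.all fun y => y = d) then ((rest.length : Int) + 1)
                else pvTrailC rest from rfl, hall]
          simp
        rw [show pvSegsA ([] : List (Int × Int)) = [] from by rw [pvSegsA]]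
        rw [show ((d.1, d.2, (1 : Int) + (pvRunLen d rest : Int)) ::
              ([] : List (Int × Int × Int))).getLast? =
              some (d.1, d.2, (1 : Int) + (pvRunLen d rest : Int)) from rfl]
        rw [hlen]
        rw [show (match some (d.1, d.2, (1 : Int) + (rest.length : Int)) with
              | none => (0 : Int) | some s => s.2.2) = (1 : Int) + (rest.length : Int) from rfl]
        rw [eT]
        omega
      · have hne := pvSegsA_ne_nil _ hd
        obtain ⟨z, zs, hz⟩ := List.exists_cons_of_ne_nil hne
        rw [hz, List.getLast?_cons_cons, ← hz, ih, pvTrailC_drop d rest hd]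

theorem pvBwd_runLen (d : Int × Int) (b : Int × Int) (rest : List (Int × Int)) :
    pvBwd d b rest = (pvRunLen d (pvRevD (b :: rest)) : Int) := by
  induction rest generalizing b with
  | nil => simp [pvBwd, pvRevD, pvRunLen]
  | cons c more ih =>
      simp only [pvBwd, pvRevD, pvRunLen]
      split
      · rw [ih]; push_cast; ring
      · simp

theorem pvRevD_append (m : List (Int × Int)) (x : Int × Int) :
    pvRevD (m ++ [x]) = pvRevD m ++
      (match m.getLast? with
       | none => []
       | some y => [(y.1 - x.1, y.2 - x.2)]) := by
  induction m with
  | nil => simp [pvRevD]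
  | cons a m' ih =>
      cases m' with
      | nil => simp [pvRevD]
      | cons b m'' =>
          simp only [List.cons_append, pvRevD, List.getLast?_cons_cons]
          rw [show (b :: m'') ++ [x] = b :: (m'' ++ [x]) from rfl] at ih
          rw [ih]

theorem pvRevD_reverse (l : List (Int × Int)) : pvRevD l.reverse = (pvFwdDiffs l).reverse := by
  induction l with
  | nil => simp [pvRevD, pvFwdDiffs]
  | cons x xs ih =>
      cases xs with
      | nil => simp [pvRevD, pvFwdDiffs]
      | cons y r =>
          rw [show (x :: y :: r).reverse = (y :: r).reverse ++ [x] by simp]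
          rw [pvRevD_append, ih]
          have hl : (y :: r).reverse.getLast? = some y := by
            simp [List.getLast?_reverse]
          rw [hl, pvFwdDiffs]
          simp

theorem pvRunLen_append_single (d : Int × Int) (m : List (Int × Int)) (y : Int × Int) :
    pvRunLen d (m ++ [y]) =
      if m.all (fun z => z = d) then m.length + (if y = d then 1 else 0) else pvRunLen d m := by
  induction m with
  | nil =>
      simp only [List.nil_append, List.all_nil, if_true, List.length_nil, Nat.zero_add]
      by_cases hy : y = d <;> simp [pvRunLen, hy]
  | cons a m' ih =>
      simp only [List.cons_append, pvRunLen, ih, List.all_cons, List.length_cons]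
      by_cases ha : a = d <;> by_cases hm : m'.all (fun z => z = d) = true <;>
        simp [ha, hm] <;> split <;> simp_all

theorem pvTrailC_append_single (s : List (Int × Int)) (x : Int × Int) :
    pvTrailC (s ++ [x]) = 1 + (pvRunLen x s.reverse : Int) := by
  induction s with
  | nil => simp [pvTrailC, pvRunLen]
  | cons y s' ih =>
      rw [show (y :: s') ++ [x] = y :: (s' ++ [x]) from rfl]
      by_cases hall : ((s' ++ [x]).all (fun z => z = y)) = true
      · have e : pvTrailC (y :: (s' ++ [x])) = (((s' ++ [x]).length : Int) + 1) := by
          rw [show pvTrailC (y :: (s' ++ [x])) =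
                if ((s' ++ [x]).all (fun z => z = y)) then (((s' ++ [x]).length : Int) + 1)
                else pvTrailC (s' ++ [x]) from rfl, hall]
          simp
        rw [e]
        simp only [List.all_append, Bool.and_eq_true, List.all_cons, List.all_nil,
          Bool.and_true, decide_eq_true_eq] at hall
        obtain ⟨hs', hx⟩ := hall
        subst hx
        have hrevall : (s'.reverse).all (fun z => z = x) = true := by
          simp only [List.all_reverse]
          simp only [List.all_eq_true, decide_eq_true_eq] at hs' ⊢
          exact hs'
        rw [List.reverse_cons, pvRunLen_append_single]
        simp [hrevall]
        omega
      · have hallf : ((s' ++ [x]).all (fun z => z = y)) = false := by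
          cases hb : (s' ++ [x]).all (fun z => z = y)
          · rfl
          · exact absurd hb hall
        have e : pvTrailC (y :: (s' ++ [x])) = pvTrailC (s' ++ [x]) := by
          rw [show pvTrailC (y :: (s' ++ [x])) =
                if ((s' ++ [x]).all (fun z => z = y)) then (((s' ++ [x]).length : Int) + 1)
                else pvTrailC (s' ++ [x]) from rfl, hallf]
          simp
        rw [e, ih, List.reverse_cons, pvRunLen_append_single]
        by_cases hrev : (s'.reverse).all (fun z => z = x) = true
        · have hs' : ∀ z ∈ s', z = x := by
            simp only [List.all_reverse, List.all_eq_true, decide_eq_true_eq] at hrev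
            exact hrev
          have hy : ¬ (y = x) := by
            intro hyx
            subst hyx
            apply hall
            simp only [List.all_eq_true, decide_eq_true_eq]
            intro z hz
            rcases List.mem_append.mp hz with h | h
            · exact hs' z h
            · simpa using h
          rw [if_pos hrev, if_neg hy]
          rw [pvRunLen_of_all x s'.reverse (by rw [List.all_reverse]; simp only [List.all_eq_true, decide_eq_true_eq]; exact hs')]
          simp
        · rw [if_neg hrev]

theorem pvTrailC_reverse_cons (x : Int × Int) (xs : List (Int × Int)) :
    pvTrailC ((x :: xs).reverse) = 1 + (pvRunLen x xs : Int) := by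
  rw [List.reverse_cons, pvTrailC_append_single, List.reverse_reverse]

theorem pvAlt_trail (path : List (Int × Int)) :
    check_last_segment_alt path = pvTrailC (pvFwdDiffs path) := by
  cases hp : path.reverse with
  | nil =>
      have hpath : path = [] := by simpa using congrArg List.reverse hp
      subst hpath
      simp [check_last_segment_alt, pvFwdDiffs, pvTrailC]
  | cons a t =>
      cases t with
      | nil =>
          have hpath : path = [a] := by simpa using congrArg List.reverse hp
          subst hpath
          simp [check_last_segment_alt, pvFwdDiffs, pvTrailC]
      | cons b rest =>
          have hrd : pvRevD path.reverse = (pvFwdDiffs path).reverse := pvRevD_reverse path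
          have h2 : pvTrailC (pvFwdDiffs path) = pvTrailC ((pvRevD path.reverse).reverse) := by
            rw [hrd, List.reverse_reverse]
          rw [h2, hp]
          rw [show pvRevD (a :: b :: rest) = (a.1 - b.1, a.2 - b.2) :: pvRevD (b :: rest) from rfl]
          rw [pvTrailC_reverse_cons]
          unfold check_last_segment_alt
          rw [hp]
          show 1 + pvBwd (a.1 - b.1, a.2 - b.2) b rest = _
          rw [pvBwd_runLen]

-- ===== VERDICT (by name: the statement is the Claim_ definition above) =====
theorem check_last_segment_spec : Claim_equal_check_last_segment := by
  intro path _
  unfold Spec_check_last_segment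
  rw [pvAlt_trail]
  unfold check_last_segment
  rw [pvDiffsA_eq_fwd, pvLast_segs]
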